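-- pv_equiv track=rewrite | github.com/AstridDahl/AiB2024 | project3/exact_msa.py | cost_optimal2k
-- ===== SOURCE A (Python) =====
-- def empty_matrix2d(r, c):
--     m = []
--     for i in range(r):
--         m.append([])
--         for j in range(c):
--             m[i].append(None)
--     return m
--
-- def prepare_matrix2d(r, c, g):
--     pm = empty_matrix2d(r, c)
--     for i in range(c):
--         pm[0][i] = i*g
--     for i in range(1, r):
--         pm[i][0] = i*g
--     return pm
--
-- def cost_optimal2k(seq1, seq2, scores, g): # From assignment1.py.
--     r = len(seq1)+1
--     c = len(seq2)+1
--     fm = prepare_matrix2d(r, c, g)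
--     for i in range(1, r): # row index
--         for j in range(1, c): # col index
--             dscore = fm[i-1][j-1] + scores[seq1[i-1]][seq2[j-1]]
--             lscore = fm[i][j-1] + g
--             uscore = fm[i-1][j] + g
--             fm[i][j] = min(dscore, lscore, uscore) # min() since dissimilarity score.
--     return fm[r-1][c-1] # return cost of optimal alignment. r-1 and c-1, since the first row has idx 0 and the first col has idx 0, when matrix is made in python.
-- ===== SOURCE B (Python) =====
-- def cost_optimal2k(seq1, seq2, scores, g):
--     # Top-down formulation: f(i, j) = optimal dissimilarity of aligning seq1[:i]
--     # with seq2[:j], computed by memoized recursion instead of filling a table.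
--     memo = {}
--     def f(i, j):
--         if (i, j) not in memo:
--             if i == 0:
--                 memo[(i, j)] = j * g
--             elif j == 0:
--                 memo[(i, j)] = i * g
--             else:
--                 memo[(i, j)] = min(f(i - 1, j - 1) + scores[seq1[i - 1]][seq2[j - 1]],
--                                    f(i, j - 1) + g,
--                                    f(i - 1, j) + g)
--         return memo[(i, j)]
--     return f(len(seq1), len(seq2))
-- ===== Notes on version B (the rewrite author's own statement) =====
-- stated objective: alternative
-- what changed: B replaces A's bottom-up table filling (allocate an (r x c) matrix, seed first row/column, fill row by row) with a top-down memoized recursion f(i,j) on prefix lengths, caching results in a dict and returning f(len(seq1),len(seq2)); it evaluates only on demand in depth-first order instead of filling the whole grid in row-major order.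
import Mathlib
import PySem

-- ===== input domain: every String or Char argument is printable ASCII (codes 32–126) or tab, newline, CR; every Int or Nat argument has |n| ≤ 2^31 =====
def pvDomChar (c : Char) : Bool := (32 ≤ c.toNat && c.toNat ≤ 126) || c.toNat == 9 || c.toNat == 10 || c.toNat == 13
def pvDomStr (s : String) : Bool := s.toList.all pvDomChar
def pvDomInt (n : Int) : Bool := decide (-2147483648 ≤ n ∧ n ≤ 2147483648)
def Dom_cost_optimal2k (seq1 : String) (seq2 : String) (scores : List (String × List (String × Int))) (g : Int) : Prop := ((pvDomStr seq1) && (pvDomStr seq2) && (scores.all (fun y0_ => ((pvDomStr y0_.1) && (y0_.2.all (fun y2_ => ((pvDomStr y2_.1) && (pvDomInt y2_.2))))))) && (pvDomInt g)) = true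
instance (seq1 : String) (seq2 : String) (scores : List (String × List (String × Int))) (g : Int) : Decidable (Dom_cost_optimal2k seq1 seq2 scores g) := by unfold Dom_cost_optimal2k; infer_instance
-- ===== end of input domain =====

-- ===== PORT A =====
-- B changes the algorithmic decomposition: top-down memoized recursion on prefix
-- lengths instead of A's bottom-up table filling; return values proved equal.
def pvLookup (d : List (String × List (String × Int))) (k : String) : Option (List (String × Int)) :=
  (d.find? (fun p => p.1 == k)).map (·.2)

def pvLookupI (d : List (String × Int)) (k : String) : Option Int :=
  (d.find? (fun p => p.1 == k)).map (·.2)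

def pvCell (m : List (List Int)) (i j : Int) : Int :=
  PySem.List.pyGetD (PySem.List.pyGetD m i []) j 0

def pvSet2 (m : List (List Int)) (i j : Int) (v : Int) : List (List Int) :=
  PySem.List.pySetD m i (PySem.List.pySetD (PySem.List.pyGetD m i []) j v)

-- m.append([]) followed by repeated m[i].append(None): the appends all target the row just
-- appended, so that row is built locally and appended once; 0 stands for Python's None —
-- every cell is overwritten before it is ever read, so the placeholder is never observable.
def empty_matrix2d (r c : Int) : List (List Int) :=
  (PySem.List.pyRange 0 r 1).foldl (fun m _i =>
    m ++ [(PySem.List.pyRange 0 c 1).foldl (fun row _j => row ++ [(0 : Int)]) []]) []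

def prepare_matrix2d (r c g : Int) : List (List Int) :=
  let pm := empty_matrix2d r c
  let pm := (PySem.List.pyRange 0 c 1).foldl (fun pm i => pvSet2 pm 0 i (i * g)) pm
  (PySem.List.pyRange 1 r 1).foldl (fun pm i => pvSet2 pm i 0 (i * g)) pm

-- scores[seq1[i-1]][seq2[j-1]]: dict lookups; the .getD defaults are unreachable under
-- Pre_cost_optimal2k (Python raises KeyError exactly there), string indices are in range.
def cost_optimal2k (seq1 : String) (seq2 : String) (scores : List (String × List (String × Int))) (g : Int) : Int :=
  let r : Int := PySem.Str.len seq1 + 1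
  let c : Int := PySem.Str.len seq2 + 1
  let fm := prepare_matrix2d r c g
  let fm := (PySem.List.pyRange 1 r 1).foldl (fun fm i =>
    (PySem.List.pyRange 1 c 1).foldl (fun fm j =>
      let dscore := pvCell fm (i-1) (j-1) +
        (pvLookupI ((pvLookup scores (String.ofList [(PySem.Str.pyGet? seq1 (i-1)).getD ' '])).getD [])
          (String.ofList [(PySem.Str.pyGet? seq2 (j-1)).getD ' '])).getD 0
      let lscore := pvCell fm i (j-1) + g
      let uscore := pvCell fm (i-1) j + g
      pvSet2 fm i j (min (min dscore lscore) uscore)) fm) fm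
  pvCell fm (r-1) (c-1)

-- ===== PORT B =====
-- Source B's inner function f(i, j): the memo dict is threaded through as state
-- (Python mutates one dict in place; here each call returns the value and the
-- extended memo). i, j are the nonnegative prefix lengths, kept as Nat; the memo
-- keys are Python's int pairs (i, j).
def goB (seq1 : String) (seq2 : String) (scores : List (String × List (String × Int))) (g : Int)
    (i j : Nat) (memo : PySem.Dict (Int × Int) Int) : Int × PySem.Dict (Int × Int) Int :=
  match memo.get? ((i : Int), (j : Int)) with
  | some v => (v, memo)
  | none =>
    if hi : i = 0 then
      ((j : Int) * g, memo.insert ((i : Int), (j : Int)) ((j : Int) * g))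
    else if hj : j = 0 then
      ((i : Int) * g, memo.insert ((i : Int), (j : Int)) ((i : Int) * g))
    else
      let p1 := goB seq1 seq2 scores g (i - 1) (j - 1) memo
      let p2 := goB seq1 seq2 scores g i (j - 1) p1.2
      let p3 := goB seq1 seq2 scores g (i - 1) j p2.2
      let v := min (min (p1.1 +
          (pvLookupI ((pvLookup scores (String.ofList [seq1.toList.getD (i - 1) ' '])).getD [])
            (String.ofList [seq2.toList.getD (j - 1) ' '])).getD 0)
        (p2.1 + g)) (p3.1 + g)
      (v, p3.2.insert ((i : Int), (j : Int)) v)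
termination_by i + j
decreasing_by all_goals omega

def cost_optimal2k_alt (seq1 : String) (seq2 : String) (scores : List (String × List (String × Int))) (g : Int) : Int :=
  (goB seq1 seq2 scores g seq1.toList.length seq2.toList.length PySem.Dict.empty).1

-- ===== PRECONDITION & SPEC =====
-- Pre_ excludes exactly the inputs on which Python A raises KeyError: some character of seq1
-- (paired with some character of seq2) has no entry in the nested scores dict.
def pvPreB (seq1 seq2 : String) (scores : List (String × List (String × Int))) : Bool :=
  seq1.toList.all (fun a => seq2.toList.all (fun b =>
    ((pvLookup scores (String.ofList [a])).bind (fun row => pvLookupI row (String.ofList [b]))).isSome))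
def Pre_cost_optimal2k (seq1 : String) (seq2 : String) (scores : List (String × List (String × Int))) (g : Int) : Prop :=
  pvPreB seq1 seq2 scores = true
instance (seq1 : String) (seq2 : String) (scores : List (String × List (String × Int))) (g : Int) : Decidable (Pre_cost_optimal2k seq1 seq2 scores g) := by unfold Pre_cost_optimal2k; infer_instance

def pvWitness_cost_optimal2k : String × String × (List (String × List (String × Int))) × Int :=
  ("ab", "ba", [("a", [("a", 0), ("b", 2)]), ("b", [("a", 2), ("b", 0)])], 3)

def Spec_cost_optimal2k (seq1 : String) (seq2 : String) (scores : List (String × List (String × Int))) (g : Int) (out : Int) : Prop := out = cost_optimal2k_alt seq1 seq2 scores g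
instance (seq1 : String) (seq2 : String) (scores : List (String × List (String × Int))) (g : Int) (out : Int) : Decidable (Spec_cost_optimal2k seq1 seq2 scores g out) := by unfold Spec_cost_optimal2k; infer_instance

-- ===== CLAIM (what is proved, stated in full; the proofs are below) =====
def Claim_equal_cost_optimal2k : Prop := ∀ (seq1 : String) (seq2 : String) (scores : List (String × List (String × Int))) (g : Int), Dom_cost_optimal2k seq1 seq2 scores g → Pre_cost_optimal2k seq1 seq2 scores g → Spec_cost_optimal2k seq1 seq2 scores g (cost_optimal2k seq1 seq2 scores g)


-- ===== LEMMAS AND PROOFS =====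

-- The mathematical DP value: pvC i j = optimal cost of aligning seq1[:i] with seq2[:j].
def pvC (seq1 seq2 : String) (scores : List (String × List (String × Int))) (g : Int)
    (i j : Nat) : Int :=
  if hi : i = 0 then (j : Int) * g
  else if hj : j = 0 then (i : Int) * g
  else
    min (min (pvC seq1 seq2 scores g (i - 1) (j - 1) +
        (pvLookupI ((pvLookup scores (String.ofList [seq1.toList.getD (i - 1) ' '])).getD [])
          (String.ofList [seq2.toList.getD (j - 1) ' '])).getD 0)
      (pvC seq1 seq2 scores g i (j - 1) + g))
    (pvC seq1 seq2 scores g (i - 1) j + g)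
termination_by i + j
decreasing_by all_goals omega

-- every entry of the memo is a correct DP value
def MemoOK (seq1 seq2 : String) (scores : List (String × List (String × Int))) (g : Int)
    (memo : PySem.Dict (Int × Int) Int) : Prop :=
  ∀ (i j : Nat) (v : Int), memo.get? ((i : Int), (j : Int)) = some v → v = pvC seq1 seq2 scores g i j

lemma memoOK_empty (seq1 seq2 : String) (scores : List (String × List (String × Int))) (g : Int) :
    MemoOK seq1 seq2 scores g PySem.Dict.empty := by
  intro i j v h
  rw [PySem.Dict.get?_empty] at h
  exact absurd h (by simp)

lemma memoOK_insert (seq1 seq2 : String) (scores : List (String × List (String × Int))) (g : Int)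
    (memo : PySem.Dict (Int × Int) Int) (a b : Nat)
    (h : MemoOK seq1 seq2 scores g memo) :
    MemoOK seq1 seq2 scores g (memo.insert ((a : Int), (b : Int)) (pvC seq1 seq2 scores g a b)) := by
  intro i j v hv
  rw [PySem.Dict.get?_insert] at hv
  by_cases he : ((i : Int), (j : Int)) = ((a : Int), (b : Int))
  · rw [if_pos he] at hv
    have hi : i = a := by
      have := congrArg Prod.fst he
      simpa using this
    have hj : j = b := by
      have := congrArg Prod.snd he
      simpa using this
    subst hi; subst hj
    exact (Option.some_inj.mp hv).symm
  · rw [if_neg he] at hv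
    exact h i j v hv

lemma goB_ok (seq1 seq2 : String) (scores : List (String × List (String × Int))) (g : Int) :
    ∀ (n i j : Nat) (memo : PySem.Dict (Int × Int) Int), i + j ≤ n →
      MemoOK seq1 seq2 scores g memo →
      (goB seq1 seq2 scores g i j memo).1 = pvC seq1 seq2 scores g i j ∧
      MemoOK seq1 seq2 scores g (goB seq1 seq2 scores g i j memo).2 := by
  intro n
  induction n with
  | zero =>
    intro i j memo hn hm
    have hi : i = 0 := by omega
    have hj : j = 0 := by omega
    subst hi; subst hj
    rw [goB]
    cases hmv : memo.get? (((0:Nat) : Int), ((0:Nat) : Int)) with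
    | some v =>
      exact ⟨hm 0 0 v hmv, hm⟩
    | none =>
      dsimp only
      refine ⟨by rw [pvC]; simp, ?_⟩
      have := memoOK_insert seq1 seq2 scores g memo 0 0 hm
      rw [pvC] at this
      simpa using this
  | succ n ih =>
    intro i j memo hn hm
    rw [goB]
    cases hmv : memo.get? ((i : Int), (j : Int)) with
    | some v =>
      exact ⟨hm i j v hmv, hm⟩
    | none =>
      dsimp only
      by_cases hi : i = 0
      · subst hi
        rw [dif_pos rfl]
        refine ⟨by rw [pvC]; simp, ?_⟩
        have := memoOK_insert seq1 seq2 scores g memo 0 j hm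
        rw [pvC] at this
        simpa using this
      · by_cases hj : j = 0
        · subst hj
          rw [dif_neg hi, dif_pos rfl]
          refine ⟨by rw [pvC]; simp [hi], ?_⟩
          have := memoOK_insert seq1 seq2 scores g memo i 0 hm
          rw [pvC, dif_neg hi] at this
          simpa using this
        · rw [dif_neg hi, dif_neg hj]
          obtain ⟨h1v, h1m⟩ := ih (i - 1) (j - 1) memo (by omega) hm
          obtain ⟨h2v, h2m⟩ := ih i (j - 1) _ (by omega) h1m
          obtain ⟨h3v, h3m⟩ := ih (i - 1) j _ (by omega) h2m
          have hval : min (min ((goB seq1 seq2 scores g (i-1) (j-1) memo).1 +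
              (pvLookupI ((pvLookup scores (String.ofList [seq1.toList.getD (i - 1) ' '])).getD [])
                (String.ofList [seq2.toList.getD (j - 1) ' '])).getD 0)
              ((goB seq1 seq2 scores g i (j-1) (goB seq1 seq2 scores g (i-1) (j-1) memo).2).1 + g))
              ((goB seq1 seq2 scores g (i-1) j (goB seq1 seq2 scores g i (j-1) (goB seq1 seq2 scores g (i-1) (j-1) memo).2).2).1 + g)
              = pvC seq1 seq2 scores g i j := by
            rw [h1v, h2v, h3v]
            conv_rhs => rw [pvC, dif_neg hi, dif_neg hj]
          refine ⟨hval, ?_⟩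
          rw [hval]
          exact memoOK_insert seq1 seq2 scores g _ i j h3m

lemma B_eq_pvC (seq1 seq2 : String) (scores : List (String × List (String × Int))) (g : Int) :
    cost_optimal2k_alt seq1 seq2 scores g
      = pvC seq1 seq2 scores g seq1.toList.length seq2.toList.length := by
  exact (goB_ok seq1 seq2 scores g (seq1.toList.length + seq2.toList.length) _ _ _
    (le_refl _) (memoOK_empty seq1 seq2 scores g)).1

-- ---------- A-side machinery: A's table fill equals a row-by-row fold ----------

-- Named forms of A's loop bodies.
def AinnerF (seq1 seq2 : String) (scores : List (String × List (String × Int))) (g i : Int)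
    (fm : List (List Int)) (j : Int) : List (List Int) :=
  let dscore := pvCell fm (i-1) (j-1) +
    (pvLookupI ((pvLookup scores (String.ofList [(PySem.Str.pyGet? seq1 (i-1)).getD ' '])).getD [])
      (String.ofList [(PySem.Str.pyGet? seq2 (j-1)).getD ' '])).getD 0
  let lscore := pvCell fm i (j-1) + g
  let uscore := pvCell fm (i-1) j + g
  pvSet2 fm i j (min (min dscore lscore) uscore)

def AouterF (seq1 seq2 : String) (scores : List (String × List (String × Int))) (g : Int)
    (fm : List (List Int)) (i : Int) : List (List Int) :=
  (PySem.List.pyRange 1 (PySem.Str.len seq2 + 1) 1).foldl (AinnerF seq1 seq2 scores g i) fm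

-- proof-side rolling row: the same recurrence computed row by row (this is what
-- A's two nested loops amount to; it is then connected to pvC)
def BinnerF (row : List (String × Int)) (g : Int) (prev cur : List Int) (jb : Int × Char) : List Int :=
  cur ++ [min (min (PySem.List.pyGetD prev (jb.1 - 1) 0 + (pvLookupI row (String.ofList [jb.2])).getD 0)
                   (PySem.List.pyGetD cur (-1) 0 + g))
              (PySem.List.pyGetD prev jb.1 0 + g)]

def BouterF (seq2 : String) (scores : List (String × List (String × Int))) (g : Int)
    (prev : List Int) (ia : Int × Char) : List Int :=
  (PySem.List.enumerate seq2.toList 1).foldl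
    (BinnerF ((pvLookup scores (String.ofList [ia.2])).getD []) g prev) [ia.1 * g]

lemma A_eq (seq1 seq2 : String) (scores : List (String × List (String × Int))) (g : Int) :
    cost_optimal2k seq1 seq2 scores g =
      pvCell ((PySem.List.pyRange 1 (PySem.Str.len seq1 + 1) 1).foldl (AouterF seq1 seq2 scores g)
        (prepare_matrix2d (PySem.Str.len seq1 + 1) (PySem.Str.len seq2 + 1) g))
        (PySem.Str.len seq1 + 1 - 1) (PySem.Str.len seq2 + 1 - 1) := rfl

-- The mathematical shape of one DP row past its first entry.
def rowExt (row : List (String × Int)) (g : Int) (prev : List Int) : List Char → Nat → Int → List Int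
  | [], _, _ => []
  | b :: bs, t, last =>
    let v := min (min (prev.getD t 0 + (pvLookupI row (String.ofList [b])).getD 0) (last + g))
                 (prev.getD (t+1) 0 + g)
    v :: rowExt row g prev bs (t+1) v

lemma length_rowExt (row : List (String × Int)) (g : Int) (prev : List Int) :
    ∀ (bs : List Char) (t : Nat) (last : Int), (rowExt row g prev bs t last).length = bs.length := by
  intro bs
  induction bs with
  | nil => intro t last; rfl
  | cons b bs ih => intro t last; simp [rowExt, ih]

-- the rolling inner fold builds exactly rowExt.
lemma bInner (row : List (String × Int)) (g : Int) (prev : List Int) :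
    ∀ (bs : List Char) (t : Nat) (cur : List Int), cur ≠ [] →
      (PySem.List.enumerate bs ((t:Int)+1)).foldl (BinnerF row g prev) cur
        = cur ++ rowExt row g prev bs t (PySem.List.pyGetD cur (-1) 0) := by
  intro bs
  induction bs with
  | nil => intro t cur _; simp [PySem.List.enumerate, rowExt]
  | cons b bs ih =>
    intro t cur hcur
    rw [PySem.List.enumerate_cons]
    simp only [List.foldl_cons]
    have hstep : BinnerF row g prev cur ((t:Int)+1, b)
        = cur ++ [min (min (prev.getD t 0 + (pvLookupI row (String.ofList [b])).getD 0)
                           (PySem.List.pyGetD cur (-1) 0 + g))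
                      (prev.getD (t+1) 0 + g)] := by
      simp only [BinnerF]
      have h1 : ((t:Int)+1) - 1 = ((t:Nat):Int) := by omega
      have h2 : ((t:Int)+1) = (((t+1:Nat)):Int) := by omega
      rw [h1, h2, PySem.List.pyGetD_natCast, PySem.List.pyGetD_natCast]
    rw [hstep]
    have h3 : ((t:Int)+1)+1 = (((t+1:Nat)):Int)+1 := by omega
    rw [h3, ih (t+1) _ (by simp)]
    rw [PySem.List.pyGetD_neg_one_append_singleton]
    simp [rowExt, List.append_assoc]

lemma stepRow_eq (row : List (String × Int)) (g : Int) (prev : List Int) (bs : List Char) (x : Int) :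
    (PySem.List.enumerate bs 1).foldl (BinnerF row g prev) [x]
      = x :: rowExt row g prev bs 0 x := by
  have h0 : (PySem.List.enumerate bs 1) = PySem.List.enumerate bs (((0:Nat):Int)+1) := by norm_num
  rw [h0, bInner row g prev bs 0 [x] (by simp)]
  have hx : PySem.List.pyGetD [x] (-1) 0 = x := by
    simpa using PySem.List.pyGetD_neg_one_append_singleton ([] : List Int) x 0
  rw [hx]
  rfl

-- set/getD bookkeeping
lemma set_getD_self (l : List (List Int)) (n : Nat) (h : n < l.length) :
    l.set n (l.getD n []) = l := by
  simp [List.getD_eq_getElem?_getD, List.getElem?_eq_getElem h, List.set_getElem_self]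

lemma getD_set_self (l : List (List Int)) (n : Nat) (v : List Int) (h : n < l.length) :
    (l.set n v).getD n [] = v := by
  simp [List.getD_eq_getElem?_getD, h]

lemma getD_set_ne (l : List (List Int)) (n m : Nat) (v : List Int) (h : n ≠ m) :
    (l.set n v).getD m [] = l.getD m [] := by
  simp [List.getD_eq_getElem?_getD, List.getElem?_set_ne h]

lemma getD_append_left (l m : List Int) (n : Nat) (h : n < l.length) :
    (l ++ m).getD n 0 = l.getD n 0 := List.getD_append l m 0 n h

lemma getD_append_len (l : List Int) (v : Int) (n : Nat) (h : n = l.length) :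
    (l ++ [v]).getD n 0 = v := by
  subst h
  simp [List.getD_eq_getElem?_getD]

-- A's inner loop fills row i with rowExt of the previous row.
lemma innerA (seq1 seq2 : String) (scores : List (String × List (String × Int))) (g : Int)
    (i : Nat) (hi : 1 ≤ i) (P : List Int) (_hP : P.length = seq2.toList.length + 1) :
    ∀ (m t : Nat) (fm : List (List Int)) (Q : List Int),
      t + m = seq2.toList.length →
      i < fm.length →
      fm.getD (i-1) [] = P →
      fm.getD i [] = Q ++ List.replicate m 0 →
      Q.length = t + 1 →
      (PySem.List.pyRange ((t:Int)+1) ((seq2.toList.length:Int)+1) 1).foldl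
          (AinnerF seq1 seq2 scores g (i:Int)) fm
        = fm.set i (Q ++ rowExt ((pvLookup scores (String.ofList [seq1.toList.getD (i-1) ' '])).getD [])
            g P (seq2.toList.drop t) t (Q.getD t 0)) := by
  intro m
  induction m with
  | zero =>
    intro t fm Q ht hlen hPm hQm hQl
    have hdrop : seq2.toList.drop t = [] := by
      apply List.drop_eq_nil_of_le; omega
    rw [PySem.List.pyRange_one_eq_nil (by omega)]
    rw [List.replicate_zero, List.append_nil] at hQm
    simp only [List.foldl_nil, hdrop, rowExt, List.append_nil]
    rw [← hQm]
    exact (set_getD_self fm i hlen).symm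
  | succ m ih =>
    intro t fm Q ht hlen hPm hQm hQl
    have htlt : t < seq2.toList.length := by omega
    rw [PySem.List.pyRange_one_cons (by omega)]
    simp only [List.foldl_cons]
    have hi1 : ((i:Int)) - 1 = (((i-1:Nat)):Int) := by omega
    have hjt : ((t:Int)+1) - 1 = ((t:Nat):Int) := by omega
    have hjt1 : ((t:Int)+1) = (((t+1:Nat)):Int) := by omega
    set a : Char := seq1.toList.getD (i-1) ' ' with ha
    set row : List (String × Int) := (pvLookup scores (String.ofList [a])).getD [] with hrow
    set b : Char := seq2.toList[t] with hb
    set v : Int := min (min (P.getD t 0 + (pvLookupI row (String.ofList [b])).getD 0)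
                            (Q.getD t 0 + g)) (P.getD (t+1) 0 + g) with hv
    have hchar1 : (PySem.Str.pyGet? seq1 ((i:Int)-1)).getD ' ' = a := by
      rw [hi1, PySem.Str.pyGet?_natCast]
      simp [ha, List.getD_eq_getElem?_getD]
    have hchar2 : (PySem.Str.pyGet? seq2 (((t:Int)+1)-1)).getD ' ' = b := by
      rw [hjt, PySem.Str.pyGet?_natCast]
      simp [hb, List.getElem?_eq_getElem htlt]
    have e1 : (Q ++ List.replicate (m+1) (0:Int)).getD t 0 = Q.getD t 0 :=
      getD_append_left _ _ _ (by omega)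
    have e2 : ∀ (w : Int), (Q ++ List.replicate (m+1) (0:Int)).set (t+1) w
        = (Q ++ [w]) ++ List.replicate m 0 := by
      intro w
      have hQL : t + 1 = Q.length := by omega
      rw [hQL, List.set_append_right _ _ (by omega)]
      simp [List.replicate_succ, List.append_assoc]
    have hstep : AinnerF seq1 seq2 scores g (i:Int) fm ((t:Int)+1)
        = fm.set i ((Q ++ [v]) ++ List.replicate m 0) := by
      simp only [AinnerF, pvCell, pvSet2]
      rw [hchar1, hchar2]
      rw [hjt, hjt1, hi1]
      simp only [PySem.List.pyGetD_natCast, PySem.List.pySetD_natCast]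
      rw [hPm, hQm, e1, ← hv, e2]
    rw [hstep]
    have ihres := ih (t+1) (fm.set i ((Q ++ [v]) ++ List.replicate m 0)) (Q ++ [v])
      (by omega) (by simpa using hlen)
      (by rw [getD_set_ne _ _ _ _ (by omega)]; exact hPm)
      (by rw [getD_set_self _ _ _ (by simpa using hlen), List.append_assoc])
      (by simp [hQl])
    have hcastr : (((t+1:Nat)):Int)+1 = ((t:Int)+1)+1 := by omega
    rw [hcastr] at ihres
    rw [ihres, List.set_set]
    have hlast : ((Q ++ [v]).getD (t+1) 0) = v := getD_append_len Q v (t+1) (by omega)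
    rw [hlast]
    rw [List.drop_eq_getElem_cons htlt, ← hb]
    simp only [rowExt]
    rw [← hv]
    simp [List.append_assoc]

-- Main simulation: A's remaining outer loop tracked against the rolling fold.
lemma mainSim (seq1 seq2 : String) (scores : List (String × List (String × Int))) (g : Int) :
    ∀ (m i0 : Nat) (fm : List (List Int)) (prev : List Int),
      i0 + m = seq1.toList.length →
      fm.length = seq1.toList.length + 1 →
      fm.getD i0 [] = prev →
      prev.length = seq2.toList.length + 1 →
      (∀ t : Nat, i0 < t → t ≤ seq1.toList.length →
        fm.getD t [] = ((t:Int)*g) :: List.replicate seq2.toList.length 0) →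
      ((PySem.List.pyRange ((i0:Int)+1) ((seq1.toList.length:Int)+1) 1).foldl
          (AouterF seq1 seq2 scores g) fm).getD seq1.toList.length []
        = (PySem.List.enumerate (seq1.toList.drop i0) ((i0:Int)+1)).foldl
            (BouterF seq2 scores g) prev := by
  intro m
  induction m with
  | zero =>
    intro i0 fm prev h0 hlen hcur hprevlen hrest
    have hi0 : i0 = seq1.toList.length := by omega
    subst hi0
    rw [PySem.List.pyRange_one_eq_nil (by omega), List.drop_eq_nil_of_le (by omega)]
    simpa [PySem.List.enumerate] using hcur
  | succ m ih =>
    intro i0 fm prev h0 hlen hcur hprevlen hrest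
    have hi0lt : i0 < seq1.toList.length := by omega
    rw [PySem.List.pyRange_one_cons (by omega)]
    rw [List.drop_eq_getElem_cons hi0lt, PySem.List.enumerate_cons]
    simp only [List.foldl_cons]
    set a : Char := seq1.toList[i0] with ha
    set row : List (String × Int) := (pvLookup scores (String.ofList [a])).getD [] with hrow
    have hcast : ((i0:Int)+1) = (((i0+1:Nat)):Int) := by omega
    have hrowcur : fm.getD (i0+1) [] = (((i0+1:Nat):Int)*g) :: List.replicate seq2.toList.length 0 :=
      hrest (i0+1) (by omega) (by omega)
    have hQ : fm.getD (i0+1) [] = [(((i0+1:Nat):Int)*g)] ++ List.replicate seq2.toList.length 0 := by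
      simpa using hrowcur
    have hApply := innerA seq1 seq2 scores g (i0+1) (by omega) prev hprevlen
      seq2.toList.length 0 fm [(((i0+1:Nat):Int)*g)]
      (by omega) (by omega) (by simpa using hcur) hQ (by simp)
    have hgetchar : seq1.toList.getD (i0+1-1) ' ' = a := by
      simp [ha, List.getD_eq_getElem?_getD, List.getElem?_eq_getElem hi0lt]
    have hAstep : AouterF seq1 seq2 scores g fm ((i0:Int)+1)
        = fm.set (i0+1) ((((i0+1:Nat):Int)*g) :: rowExt row g prev seq2.toList 0 (((i0+1:Nat):Int)*g)) := by
      rw [AouterF, PySem.Str.len_eq, hcast]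
      have h1 : (((0:Nat)):Int)+1 = 1 := by norm_num
      rw [h1] at hApply
      rw [hApply]
      rw [hgetchar, ← hrow]
      simp
    have hBstep : BouterF seq2 scores g prev ((i0:Int)+1, a)
        = (((i0+1:Nat):Int)*g) :: rowExt row g prev seq2.toList 0 (((i0+1:Nat):Int)*g) := by
      show (PySem.List.enumerate seq2.toList 1).foldl
          (BinnerF ((pvLookup scores (String.ofList [a])).getD []) g prev) [((i0:Int)+1) * g]
        = (((i0+1:Nat):Int)*g) :: rowExt row g prev seq2.toList 0 (((i0+1:Nat):Int)*g)
      rw [← hrow, stepRow_eq, hcast]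
    rw [hAstep, hBstep]
    set newRow : List Int := (((i0+1:Nat):Int)*g) :: rowExt row g prev seq2.toList 0 (((i0+1:Nat):Int)*g) with hnr
    have hlen' : (fm.set (i0+1) newRow).length = seq1.toList.length + 1 := by simpa using hlen
    have hres := ih (i0+1) (fm.set (i0+1) newRow) newRow (by omega) hlen'
      (getD_set_self _ _ _ (by omega))
      (by rw [hnr, List.length_cons, length_rowExt])
      (fun t ht1 ht2 => by
        rw [getD_set_ne _ _ _ _ (by omega)]
        exact hrest t (by omega) ht2)
    have hc2 : ((i0:Int)+1)+1 = (((i0+1:Nat)):Int)+1 := by omega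
    rw [hc2]
    exact hres

-- empty_matrix2d is a replicate grid
lemma empty_eq (r c : Nat) :
    empty_matrix2d (r:Int) (c:Int) = List.replicate r (List.replicate c (0:Int)) := by
  rw [empty_matrix2d]
  have hin : (PySem.List.pyRange 0 (c:Int) 1).foldl (fun row _ => row ++ [(0:Int)]) []
      = List.replicate c 0 := by
    rw [PySem.List.foldl_append_singleton_eq_map (fun _ => (0:Int)),
        PySem.List.pyRange_zero_natCast, List.nil_append, List.map_map]
    simp only [Function.comp_def]
    rw [List.map_const']
    simp
  rw [hin]
  rw [PySem.List.foldl_append_singleton_eq_map (fun _ => List.replicate c (0:Int)),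
      PySem.List.pyRange_zero_natCast, List.nil_append, List.map_map]
  simp only [Function.comp_def]
  rw [List.map_const']
  simp

-- first prepare loop: fills row 0
lemma prep1 (g : Int) :
    ∀ (k : Nat) (rowA : List Int) (rest : List (List Int)), k ≤ rowA.length →
      (PySem.List.pyRange 0 (k:Int) 1).foldl (fun pm i => pvSet2 pm 0 i (i * g)) (rowA :: rest)
        = (((List.range k).map fun j => ((j:Nat):Int)*g) ++ rowA.drop k) :: rest := by
  intro k
  induction k with
  | zero => intro rowA rest _; simp [PySem.List.pyRange_one_eq_nil]
  | succ k ih =>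
    intro rowA rest hk
    have hcast : ((k+1:Nat):Int) = ((k:Nat):Int)+1 := by omega
    rw [hcast, PySem.List.pyRange_one_succ_right (by omega), List.foldl_append]
    rw [ih rowA rest (by omega)]
    simp only [List.foldl_cons, List.foldl_nil]
    rw [pvSet2]
    have h0 : PySem.List.pyGetD ((((List.range k).map fun j => ((j:Nat):Int)*g) ++ rowA.drop k) :: rest) 0 []
        = ((List.range k).map fun j => ((j:Nat):Int)*g) ++ rowA.drop k := by
      simpa using PySem.List.pyGetD_natCast ((((List.range k).map fun j => ((j:Nat):Int)*g) ++ rowA.drop k) :: rest) 0 []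
    have hset0 : ∀ (xs : List (List Int)) (v : List Int), PySem.List.pySetD xs (0:Int) v = xs.set 0 v := by
      intro xs v; simpa using PySem.List.pySetD_natCast xs 0 v
    rw [h0, PySem.List.pySetD_natCast, hset0]
    have hklt : k < rowA.length := by omega
    have hdrop : rowA.drop k = rowA[k] :: rowA.drop (k+1) := List.drop_eq_getElem_cons hklt
    rw [hdrop]
    have hlenmap : ((List.range k).map fun j => ((j:Nat):Int)*g).length = k := by simp
    have hset : (((List.range k).map fun j => ((j:Nat):Int)*g) ++ rowA[k] :: rowA.drop (k+1)).set k (((k:Nat):Int)*g)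
        = ((List.range (k+1)).map fun j => ((j:Nat):Int)*g) ++ rowA.drop (k+1) := by
      rw [List.set_append_right _ _ (by omega), hlenmap]
      have hkk : k - k = 0 := by omega
      rw [hkk, List.set_cons_zero, List.range_succ]
      simp
    rw [hset]
    simp

-- second prepare loop: sets the head of each later row; getD characterisation
lemma prep2 (g : Int) :
    ∀ (m a : Nat) (pm : List (List Int)),
      ((PySem.List.pyRange (a:Int) ((a+m:Nat):Int) 1).foldl (fun pm i => pvSet2 pm i 0 (i * g)) pm).length = pm.length ∧
      ∀ (t : Nat),
        ((PySem.List.pyRange (a:Int) ((a+m:Nat):Int) 1).foldl (fun pm i => pvSet2 pm i 0 (i * g)) pm).getD t []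
          = if a ≤ t ∧ t < a+m then (pm.getD t []).set 0 ((t:Int)*g) else pm.getD t [] := by
  intro m
  induction m with
  | zero =>
    intro a pm
    rw [PySem.List.pyRange_one_eq_nil (by omega)]
    refine ⟨rfl, fun t => ?_⟩
    simp only [List.foldl_nil]
    rw [if_neg (by omega)]
  | succ m ih =>
    intro a pm
    have hcast : ((a+(m+1):Nat):Int) = ((a+1+m:Nat):Int) := by omega
    rw [hcast, PySem.List.pyRange_one_cons (by omega)]
    simp only [List.foldl_cons]
    have hstep : pvSet2 pm (a:Int) 0 ((a:Int)*g) = pm.set a ((pm.getD a []).set 0 ((a:Int)*g)) := by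
      rw [pvSet2, PySem.List.pyGetD_natCast]
      have h0 : PySem.List.pySetD (pm.getD a []) (0:Int) (((a:Nat):Int)*g) = (pm.getD a []).set 0 ((a:Int)*g) := by
        simpa using PySem.List.pySetD_natCast (pm.getD a []) 0 (((a:Nat):Int)*g)
      rw [h0, PySem.List.pySetD_natCast]
    have hcast2 : ((a:Int)+1) = ((a+1:Nat):Int) := by omega
    rw [hstep, hcast2]
    obtain ⟨ihlen, ihget⟩ := ih (a+1) (pm.set a ((pm.getD a []).set 0 ((a:Int)*g)))
    refine ⟨by simpa using ihlen, fun t => ?_⟩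
    rw [ihget t]
    by_cases h1 : a+1 ≤ t ∧ t < a+1+m
    · rw [if_pos h1, if_pos (by omega)]
      rw [getD_set_ne _ _ _ _ (by omega)]
    · rw [if_neg h1]
      by_cases h2 : t = a
      · subst h2
        by_cases h3 : t < pm.length
        · rw [getD_set_self _ _ _ h3, if_pos (by omega)]
        · rw [if_pos (by omega)]
          rw [List.set_eq_of_length_le (show pm.length ≤ t by omega)]
          have : pm.getD t [] = [] := by
            simp [List.getD_eq_getElem?_getD, List.getElem?_eq_none (show pm.length ≤ t by omega)]
          rw [this]
          simp
      · rw [getD_set_ne _ _ _ _ (by omega), if_neg (by omega)]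

-- the prepared matrix, row by row
lemma prepare_rows (seq1 seq2 : String) (g : Int)
    (n1 n2 : Nat) (h1 : n1 = seq1.toList.length) (h2 : n2 = seq2.toList.length) :
    let pm := prepare_matrix2d (PySem.Str.len seq1 + 1) (PySem.Str.len seq2 + 1) g
    pm.length = n1 + 1 ∧
    pm.getD 0 [] = ((List.range (n2+1)).map fun j => ((j:Nat):Int)*g) ∧
    (∀ t : Nat, 1 ≤ t → t ≤ n1 → pm.getD t [] = ((t:Int)*g) :: List.replicate n2 0) := by
  intro pm
  have hr : PySem.Str.len seq1 + 1 = ((n1+1:Nat):Int) := by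
    rw [PySem.Str.len_eq, h1]; omega
  have hc : PySem.Str.len seq2 + 1 = ((n2+1:Nat):Int) := by
    rw [PySem.Str.len_eq, h2]; omega
  have hpm : pm = (PySem.List.pyRange 1 ((n1+1:Nat):Int) 1).foldl (fun pm i => pvSet2 pm i 0 (i * g))
      ((((List.range (n2+1)).map fun j => ((j:Nat):Int)*g)) :: List.replicate n1 (List.replicate (n2+1) 0)) := by
    show prepare_matrix2d _ _ g = _
    rw [prepare_matrix2d, hr, hc, empty_eq]
    rw [List.replicate_succ]
    rw [prep1 g (n2+1) (List.replicate (n2+1) 0) _ (by simp)]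
    simp
  obtain ⟨plen, pget⟩ := prep2 g n1 1
    ((((List.range (n2+1)).map fun j => ((j:Nat):Int)*g)) :: List.replicate n1 (List.replicate (n2+1) 0))
  have e : PySem.List.pyRange ((1:Nat):Int) ((1+n1:Nat):Int) 1 = PySem.List.pyRange 1 ((n1+1:Nat):Int) 1 := by
    have e1 : ((1:Nat):Int) = 1 := by norm_num
    have e2 : ((1+n1:Nat):Int) = ((n1+1:Nat):Int) := by omega
    rw [e1, e2]
  rw [e] at plen pget
  rw [← hpm] at plen pget
  refine ⟨by simpa using plen, ?_, ?_⟩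
  · rw [pget 0, if_neg (by omega)]
    rfl
  · intro t ht1 ht2
    rw [pget t, if_pos (by omega)]
    have hbase : (((((List.range (n2+1)).map fun j => ((j:Nat):Int)*g)) :: List.replicate n1 (List.replicate (n2+1) (0:Int))).getD t [])
        = List.replicate (n2+1) (0:Int) := by
      match t, ht1 with
      | (t+1), _ =>
        have htn : t < n1 := by omega
        simp only [List.getD_cons_succ]
        simp [List.getD_eq_getElem?_getD, htn]
    rw [hbase, List.replicate_succ]
    rfl

-- ---------- connecting the rolling fold to pvC ----------

-- the DP row i as a list
def rowC (seq1 seq2 : String) (scores : List (String × List (String × Int))) (g : Int)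
    (i : Nat) : List Int :=
  (List.range (seq2.toList.length + 1)).map (fun j => pvC seq1 seq2 scores g i j)

lemma rowC_getD (seq1 seq2 : String) (scores : List (String × List (String × Int))) (g : Int)
    (i t : Nat) (ht : t ≤ seq2.toList.length) :
    (rowC seq1 seq2 scores g i).getD t 0 = pvC seq1 seq2 scores g i t := by
  rw [rowC]
  rw [List.getD_eq_getElem?_getD, List.getElem?_map, List.getElem?_range (by omega)]
  rfl

-- one rowExt over row i computes row i+1 past position t
lemma rowExt_pvC (seq1 seq2 : String) (scores : List (String × List (String × Int))) (g : Int)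
    (i : Nat) :
    ∀ (m t : Nat), t + m = seq2.toList.length →
      rowExt ((pvLookup scores (String.ofList [seq1.toList.getD i ' '])).getD []) g
          (rowC seq1 seq2 scores g i) (seq2.toList.drop t) t (pvC seq1 seq2 scores g (i+1) t)
        = (List.range' (t+1) m).map (fun j => pvC seq1 seq2 scores g (i+1) j) := by
  intro m
  induction m with
  | zero =>
    intro t ht
    rw [List.drop_eq_nil_of_le (by omega)]
    rfl
  | succ m ih =>
    intro t ht
    have htlt : t < seq2.toList.length := by omega
    rw [List.drop_eq_getElem_cons htlt]
    simp only [rowExt]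
    have hb : seq2.toList[t] = seq2.toList.getD t ' ' := by
      simp [List.getD_eq_getElem?_getD, List.getElem?_eq_getElem htlt]
    have hv : min (min ((rowC seq1 seq2 scores g i).getD t 0 +
          (pvLookupI ((pvLookup scores (String.ofList [seq1.toList.getD i ' '])).getD [])
            (String.ofList [seq2.toList[t]])).getD 0)
          (pvC seq1 seq2 scores g (i+1) t + g))
        ((rowC seq1 seq2 scores g i).getD (t+1) 0 + g)
        = pvC seq1 seq2 scores g (i+1) (t+1) := by
      rw [rowC_getD seq1 seq2 scores g i t (by omega),
          rowC_getD seq1 seq2 scores g i (t+1) (by omega), hb]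
      conv_rhs => rw [pvC]
      rw [dif_neg (by omega : ¬ (i+1) = 0), dif_neg (by omega : ¬ (t+1) = 0)]
      simp only [Nat.add_sub_cancel]
    rw [hv]
    rw [ih (t+1) (by omega)]
    rw [List.range'_succ]
    simp

-- the rolling fold from row i0 reaches row n1
lemma roll_rows (seq1 seq2 : String) (scores : List (String × List (String × Int))) (g : Int) :
    ∀ (m i0 : Nat), i0 + m = seq1.toList.length →
      (PySem.List.enumerate (seq1.toList.drop i0) ((i0:Int)+1)).foldl
          (BouterF seq2 scores g) (rowC seq1 seq2 scores g i0)
        = rowC seq1 seq2 scores g seq1.toList.length := by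
  intro m
  induction m with
  | zero =>
    intro i0 h0
    have : i0 = seq1.toList.length := by omega
    subst this
    rw [List.drop_eq_nil_of_le (by omega)]
    rfl
  | succ m ih =>
    intro i0 h0
    have hi0lt : i0 < seq1.toList.length := by omega
    rw [List.drop_eq_getElem_cons hi0lt, PySem.List.enumerate_cons]
    simp only [List.foldl_cons]
    have ha : seq1.toList[i0] = seq1.toList.getD i0 ' ' := by
      simp [List.getD_eq_getElem?_getD, List.getElem?_eq_getElem hi0lt]
    have hstep : BouterF seq2 scores g (rowC seq1 seq2 scores g i0) ((i0:Int)+1, seq1.toList[i0])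
        = rowC seq1 seq2 scores g (i0+1) := by
      show (PySem.List.enumerate seq2.toList 1).foldl
          (BinnerF ((pvLookup scores (String.ofList [seq1.toList[i0]])).getD []) g
            (rowC seq1 seq2 scores g i0)) [((i0:Int)+1) * g]
        = rowC seq1 seq2 scores g (i0+1)
      rw [stepRow_eq]
      have hx : ((i0:Int)+1) * g = pvC seq1 seq2 scores g (i0+1) 0 := by
        rw [pvC]
        simp
      rw [hx, ha]
      have hdrop0 : seq2.toList = seq2.toList.drop 0 := rfl
      rw [hdrop0, rowExt_pvC seq1 seq2 scores g i0 seq2.toList.length 0 (by omega)]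
      rw [rowC, List.range_eq_range', List.range'_succ]
      simp
    rw [hstep]
    have hc : ((i0:Int)+1)+1 = (((i0+1:Nat)):Int)+1 := by omega
    rw [hc]
    exact ih (i0+1) (by omega)

-- ===== VERDICT (by name: the statement is the Claim_ definition above) =====
theorem cost_optimal2k_spec : Claim_equal_cost_optimal2k := by
  intro seq1 seq2 scores g _hdom _hpre
  unfold Spec_cost_optimal2k
  rw [A_eq, B_eq_pvC]
  obtain ⟨plen, pget0, pgett⟩ := prepare_rows seq1 seq2 g
    seq1.toList.length seq2.toList.length rfl rfl
  have hsim := mainSim seq1 seq2 scores g seq1.toList.length 0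
    (prepare_matrix2d (PySem.Str.len seq1 + 1) (PySem.Str.len seq2 + 1) g)
    (((List.range (seq2.toList.length+1)).map fun j => ((j:Nat):Int)*g))
    (by omega) plen pget0 (by simp)
    (fun t ht1 ht2 => pgett t (by omega) ht2)
  have hz : (((0:Nat)):Int) + 1 = 1 := by norm_num
  rw [hz, List.drop_zero] at hsim
  have hrow0 : ((List.range (seq2.toList.length+1)).map fun j => ((j:Nat):Int)*g)
      = rowC seq1 seq2 scores g 0 := by
    rw [rowC]
    apply List.map_congr_left
    intro j _
    rw [pvC]
    simp
  have hroll := roll_rows seq1 seq2 scores g seq1.toList.length 0 (by omega)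
  rw [List.drop_zero] at hroll
  have hz2 : (((0:Nat)):Int) + 1 = 1 := by norm_num
  rw [hz2] at hroll
  rw [hrow0, hroll] at hsim
  set FA := (PySem.List.pyRange 1 ((PySem.Str.len seq1) + 1) 1).foldl (AouterF seq1 seq2 scores g)
    (prepare_matrix2d (PySem.Str.len seq1 + 1) (PySem.Str.len seq2 + 1) g) with hFA
  have hFA' : (PySem.List.pyRange 1 ((seq1.toList.length:Int) + 1) 1).foldl (AouterF seq1 seq2 scores g)
      (prepare_matrix2d (PySem.Str.len seq1 + 1) (PySem.Str.len seq2 + 1) g) = FA := by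
    rw [hFA, PySem.Str.len_eq]
  rw [hFA'] at hsim
  have hL : pvCell FA (PySem.Str.len seq1 + 1 - 1) (PySem.Str.len seq2 + 1 - 1)
      = (FA.getD seq1.toList.length []).getD seq2.toList.length 0 := by
    rw [pvCell, PySem.Str.len_eq, PySem.Str.len_eq]
    rw [show ((seq1.toList.length:Int) + 1 - 1) = ((seq1.toList.length:Nat):Int) by omega]
    rw [show ((seq2.toList.length:Int) + 1 - 1) = ((seq2.toList.length:Nat):Int) by omega]
    rw [PySem.List.pyGetD_natCast, PySem.List.pyGetD_natCast]
  rw [hL, hsim]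
  exact rowC_getD seq1 seq2 scores g seq1.toList.length seq2.toList.length (le_refl _)
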